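-- pv_equiv track=rewrite | github.com/Kerber0/Programacion | Python/recuperacion/examen2_numeros_multiplos_letras_fibonacci_estudiantes.py | compararLetras
-- ===== SOURCE A (Python) =====
-- def compararLetras(a: set, b: set, c: set) -> dict:
--     """
--     Devuelve unión, intersección y exclusivas de tres conjuntos.
--     """
--     if not all(isinstance(s, set) for s in (a, b, c)):
--         raise TypeError("Se esperaban conjuntos")
--     tot = a | b | c
--     com = a & b & c
--     # Exclusivas: conteo==1
--     exclusivas = {letra for letra in tot
--                   if [letra in a, letra in b, letra in c].count(True) == 1}
--     return {"Totales": tot, "Comunes": com, "Exclusivas": exclusivas}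
-- ===== SOURCE B (Python) =====
-- def compararLetras(a: set, b: set, c: set) -> dict:
--     """Single counting pass: tally how many of the three sets contain each element."""
--     if not all(isinstance(s, set) for s in (a, b, c)):
--         raise TypeError("Se esperaban conjuntos")
--     counts = {}
--     for s in (a, b, c):
--         for x in s:
--             counts[x] = counts.get(x, 0) + 1
--     return {"Totales": set(counts),
--             "Comunes": {x for x, k in counts.items() if k == 3},
--             "Exclusivas": {x for x, k in counts.items() if k == 1}}
-- ===== Notes on version B (the rewrite author's own statement) =====
-- stated objective: alternative
-- what changed: Instead of three separate set operations (union, chained intersections, and a membership-counting comprehension over the union), B makes one counting pass building a dict that tallies in how many of the three sets each element occurs, and reads Totales (all keys), Comunes (tally 3) and Exclusivas (tally 1) off that dict.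
import Mathlib
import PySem

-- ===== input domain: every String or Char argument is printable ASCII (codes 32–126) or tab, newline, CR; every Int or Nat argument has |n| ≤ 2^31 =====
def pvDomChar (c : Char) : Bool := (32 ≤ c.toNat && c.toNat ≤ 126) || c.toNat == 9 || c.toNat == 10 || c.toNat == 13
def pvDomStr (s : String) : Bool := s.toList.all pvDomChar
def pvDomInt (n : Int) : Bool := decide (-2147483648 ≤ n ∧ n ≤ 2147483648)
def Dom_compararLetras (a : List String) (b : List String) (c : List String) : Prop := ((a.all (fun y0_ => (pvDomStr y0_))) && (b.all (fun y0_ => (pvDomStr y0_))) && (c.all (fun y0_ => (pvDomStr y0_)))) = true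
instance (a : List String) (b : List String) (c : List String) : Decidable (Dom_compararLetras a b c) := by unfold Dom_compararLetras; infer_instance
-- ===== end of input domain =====

-- B replaces A's per-category set operations by ONE counting pass (a dict tallying in how
-- many of the three sets each element occurs), then reads all three answers off that tally;
-- objective: alternative decomposition.

-- ===== PORT A =====
-- (the isinstance guard always passes for well-typed inputs and ports away)
def compararLetras (a : List String) (b : List String) (c : List String) : List (String × List String) :=
  let tot : PySem.Set String := PySem.Set.union (PySem.Set.union (PySem.Set.ofList a) b) c
  let com : PySem.Set String := PySem.Set.inter (PySem.Set.inter (PySem.Set.ofList a) b) c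
  let exclusivas : PySem.Set String :=
    PySem.Set.ofList (tot.filter (fun letra =>
      ([PySem.Set.contains a letra, PySem.Set.contains b letra, PySem.Set.contains c letra].count true) == 1))
  [("Totales", tot), ("Comunes", com), ("Exclusivas", exclusivas)]

-- ===== PORT B =====
def compararLetras_alt (a : List String) (b : List String) (c : List String) : List (String × List String) :=
  let counts : PySem.Dict String Int :=
    [a, b, c].foldl (fun d s => s.foldl (fun d x => d.insert x (d.getD x 0 + 1)) d) PySem.Dict.empty
  [("Totales", PySem.Set.ofList counts.keys),
   ("Comunes", PySem.Set.ofList ((counts.items.filter (fun p => p.2 == 3)).map (·.1))),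
   ("Exclusivas", PySem.Set.ofList ((counts.items.filter (fun p => p.2 == 1)).map (·.1)))]

-- ===== PRECONDITION & SPEC =====
-- Pre_ is the set-representation invariant of the type convention: a Python set is a list of DISTINCT elements.
def Pre_compararLetras (a : List String) (b : List String) (c : List String) : Prop :=
  a.Nodup ∧ b.Nodup ∧ c.Nodup
instance (a : List String) (b : List String) (c : List String) : Decidable (Pre_compararLetras a b c) := by unfold Pre_compararLetras; infer_instance
def pvWitness_compararLetras : List String × List String × List String := (["x", "y"], ["y"], ["z"])

def Spec_compararLetras (a : List String) (b : List String) (c : List String) (out : List (String × List String)) : Prop := out = compararLetras_alt a b c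
instance (a : List String) (b : List String) (c : List String) (out : List (String × List String)) : Decidable (Spec_compararLetras a b c out) := by unfold Spec_compararLetras; infer_instance

-- ===== CLAIM (what is proved, stated in full; the proofs are below) =====
def Claim_equal_compararLetras : Prop := ∀ (a : List String) (b : List String) (c : List String), Dom_compararLetras a b c → Pre_compararLetras a b c → Spec_compararLetras a b c (compararLetras a b c)

-- ===== LEMMAS AND PROOFS =====

-- B's nested loop over (a, b, c) builds exactly Counter(a ++ b ++ c)
lemma counts_eq_counter (a b c : List String) :
    [a, b, c].foldl (fun d s => s.foldl (fun d x => d.insert x (d.getD x 0 + 1)) d) PySem.Dict.empty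
      = PySem.Dict.counter (a ++ b ++ c) := by
  rw [← PySem.Dict.foldl_insert_getD_add_one_eq_counter, List.foldl_append, List.foldl_append]
  rfl

-- under Nodup, the concatenation count is the boolean membership tally
lemma count_append3 (a b c : List String) (ha : a.Nodup) (hb : b.Nodup) (hc : c.Nodup) (x : String) :
    (a ++ b ++ c).count x
      = (if x ∈ a then 1 else 0) + (if x ∈ b then 1 else 0) + (if x ∈ c then 1 else 0) := by
  have la : a.count x = if x ∈ a then 1 else 0 := by
    split_ifs with h
    · exact le_antisymm (List.nodup_iff_count_le_one.mp ha x) (List.count_pos_iff.mpr h)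
    · simpa using List.count_eq_zero.mpr h
  have lb : b.count x = if x ∈ b then 1 else 0 := by
    split_ifs with h
    · exact le_antisymm (List.nodup_iff_count_le_one.mp hb x) (List.count_pos_iff.mpr h)
    · simpa using List.count_eq_zero.mpr h
  have lc : c.count x = if x ∈ c then 1 else 0 := by
    split_ifs with h
    · exact le_antisymm (List.nodup_iff_count_le_one.mp hc x) (List.count_pos_iff.mpr h)
    · simpa using List.count_eq_zero.mpr h
  simp only [List.count_append, la, lb, lc]

-- filtering an updated set by a predicate that forces membership in the base set
lemma filter_update (s : List String) (xs : List String) (p : String → Bool)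
    (h : ∀ x, p x = true → x ∈ s) :
    (PySem.Set.update s xs).filter p = s.filter p := by
  rw [PySem.Set.update_eq_append_filter, List.filter_append]
  have : ((PySem.Set.ofList xs).filter (fun y => !PySem.Set.contains s y)).filter p = [] := by
    rw [List.filter_eq_nil_iff]
    intro x hx hp
    have hxs := List.of_mem_filter hx
    simp only [Bool.not_eq_eq_eq_not, Bool.not_true] at hxs
    have hm : PySem.Set.contains s x = true := by rw [PySem.Set.contains_iff]; exact h x hp
    rw [hm] at hxs
    exact Bool.noConfusion hxs
  rw [this, List.append_nil]

-- ===== VERDICT (by name: the statement is the Claim_ definition above) =====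
theorem compararLetras_spec : Claim_equal_compararLetras := by
  intro a b c _ ⟨ha, hb, hc⟩
  unfold Spec_compararLetras compararLetras compararLetras_alt
  rw [counts_eq_counter]
  have hofa : PySem.Set.ofList a = a := PySem.Set.ofList_eq_self_of_nodup a ha
  -- tot as ofList of the concatenation
  have htot : PySem.Set.ofList (a ++ b ++ c)
      = PySem.Set.union (PySem.Set.union (PySem.Set.ofList a) b) c := by
    rw [PySem.Set.ofList_append, PySem.Set.ofList_append]
    rfl
  have hnodtot : (PySem.Set.union (PySem.Set.union (PySem.Set.ofList a) b) c).Nodup :=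
    PySem.Set.nodup_union _ _ (PySem.Set.nodup_union _ _ (PySem.Set.nodup_ofList a))
  -- items of the counter, reduced to a filter of tot
  have hitems : ∀ (n : Int),
      ((PySem.Dict.counter (a ++ b ++ c)).items.filter (fun p => p.2 == n)).map (·.1)
        = (PySem.Set.union (PySem.Set.union (PySem.Set.ofList a) b) c).filter
            (fun k => ((a ++ b ++ c).count k : Int) == n) := by
    intro n
    rw [PySem.Dict.items_counter, List.filter_map, List.map_map, htot]
    simp only [Function.comp_def]
    simp
  -- Totales
  have hT : PySem.Set.ofList (PySem.Dict.keys (PySem.Dict.counter (a ++ b ++ c)))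
      = PySem.Set.union (PySem.Set.union (PySem.Set.ofList a) b) c := by
    rw [PySem.Dict.keys_counter, PySem.Set.ofList_ofList, htot]
  -- Comunes
  have hC : PySem.Set.ofList
        (((PySem.Dict.counter (a ++ b ++ c)).items.filter (fun p => p.2 == 3)).map (·.1))
      = PySem.Set.inter (PySem.Set.inter (PySem.Set.ofList a) b) c := by
    rw [hitems 3]
    have hpred : ∀ x, (((a ++ b ++ c).count x : Int) == 3) = true → x ∈ PySem.Set.ofList a := by
      intro x hx
      rw [count_append3 a b c ha hb hc] at hx
      simp only [beq_iff_eq] at hx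
      rw [hofa]
      by_contra hmem
      simp only [hmem, if_false] at hx
      split_ifs at hx <;> omega
    rw [show PySem.Set.union (PySem.Set.union (PySem.Set.ofList a) b) c
          = PySem.Set.update (PySem.Set.update (PySem.Set.ofList a) b) c from rfl]
    rw [filter_update _ c _ (fun x hx => by rw [PySem.Set.mem_update]; exact Or.inl (hpred x hx)),
        filter_update _ b _ hpred]
    have heq : (PySem.Set.ofList a).filter (fun k => ((a ++ b ++ c).count k : Int) == 3)
        = PySem.Set.inter (PySem.Set.inter (PySem.Set.ofList a) b) c := by
      rw [show PySem.Set.inter (PySem.Set.inter (PySem.Set.ofList a) b) c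
            = ((PySem.Set.ofList a).filter (fun x => PySem.Set.contains b x)).filter
                (fun x => PySem.Set.contains c x) from rfl]
      rw [List.filter_filter]
      apply List.filter_congr
      intro x hx
      rw [hofa] at hx
      rw [count_append3 a b c ha hb hc]
      by_cases h2 : x ∈ b <;> by_cases h3 : x ∈ c <;>
        simp [hx, h2, h3]
    rw [heq]
    exact PySem.Set.ofList_eq_self_of_nodup _
      (List.Nodup.filter _ (PySem.Set.nodup_inter (PySem.Set.ofList a) b (PySem.Set.nodup_ofList a)))
  -- Exclusivas
  have hE : PySem.Set.ofList
        (((PySem.Dict.counter (a ++ b ++ c)).items.filter (fun p => p.2 == 1)).map (·.1))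
      = PySem.Set.ofList
          ((PySem.Set.union (PySem.Set.union (PySem.Set.ofList a) b) c).filter (fun letra =>
            ([PySem.Set.contains a letra, PySem.Set.contains b letra,
              PySem.Set.contains c letra].count true) == 1)) := by
    rw [hitems 1]
    congr 1
    apply List.filter_congr
    intro x _
    rw [count_append3 a b c ha hb hc]
    by_cases h1 : x ∈ a <;> by_cases h2 : x ∈ b <;> by_cases h3 : x ∈ c <;>
      simp [h1, h2, h3]
  simp only [hT, hC, hE]
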